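-- pv_equiv track=rewrite | github.com/bhavya25155-web/CO_RISCV_2025 | co_2026_evaluation_framework_release/SimpleAssembler/Assembler.py | create_labels_and_instructions
-- ===== SOURCE A (Python) =====
-- def create_labels_and_instructions(cleaned_lines):
--     label={}
--     all_instrs=[]
--     temp_pc=0
--     for line in cleaned_lines:
--         instr_body=line
--         if ":" in line:
--             lbl_name=line[:line.index(":")].strip()
--             if lbl_name=="":
--                 raise ValueError("Empty label")
--             if not lbl_name[0].isalpha():
--                 raise ValueError("Label must start with a letter")
--             label[lbl_name]=temp_pc
--             instr_body=line[line.index(":")+1:].strip()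
--         if instr_body!="":
--             all_instrs.append(instr_body)
--             temp_pc+=4
--     return label,all_instrs
-- ===== SOURCE B (Python) =====
-- def create_labels_and_instructions(cleaned_lines):
--     # Pass 1: parse each line into (label_name_or_None, instruction_body),
--     # doing the ':' split, stripping and label validation here so the
--     # ValueErrors fire in the same line order as before.
--     parsed = []
--     for line in cleaned_lines:
--         if ":" in line:
--             head, _, tail = line.partition(":")
--             name = head.strip()
--             if name == "":
--                 raise ValueError("Empty label")
--             if not name[0].isalpha():
--                 raise ValueError("Label must start with a letter")
--             parsed.append((name, tail.strip()))
--         else: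
--             parsed.append((None, line))
--     # Pass 2: assign addresses; the pc is just 4 * number of emitted instructions.
--     label = {}
--     all_instrs = []
--     for name, body in parsed:
--         if name is not None:
--             label[name] = 4 * len(all_instrs)
--         if body != "":
--             all_instrs.append(body)
--     return label, all_instrs
-- ===== Notes on version B (the rewrite author's own statement) =====
-- stated objective: alternative
-- what changed: Single interleaved loop replaced by a two-pass assembler: pass 1 parses/validates each line into (label-or-None, body) tuples via str.partition, pass 2 emits instructions and assigns each label the address 4*len(all_instrs) instead of maintaining a running temp_pc.
import Mathlib
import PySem

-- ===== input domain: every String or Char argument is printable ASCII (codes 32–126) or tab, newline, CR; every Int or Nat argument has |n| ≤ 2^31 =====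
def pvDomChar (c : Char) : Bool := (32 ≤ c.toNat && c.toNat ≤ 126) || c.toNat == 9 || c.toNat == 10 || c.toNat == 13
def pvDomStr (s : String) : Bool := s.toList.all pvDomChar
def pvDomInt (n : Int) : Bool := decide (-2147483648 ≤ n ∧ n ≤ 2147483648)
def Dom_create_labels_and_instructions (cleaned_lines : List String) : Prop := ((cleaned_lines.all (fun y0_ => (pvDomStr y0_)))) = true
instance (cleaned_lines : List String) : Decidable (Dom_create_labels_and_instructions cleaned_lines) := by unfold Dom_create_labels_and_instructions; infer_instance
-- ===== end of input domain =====

-- B restructures A's single interleaved loop as a two-pass assembler (parse/validate, then emit);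
-- return values are equal on every input where A does not raise (Pre_ excludes A's ValueErrors).

-- ===== PORT A =====
-- One loop over the lines carrying (label dict, instruction list, temp_pc); `none` = the ValueError raises.
-- line.index(":") is guarded by `":" in line`, so the find result is nonnegative and line[:idx]/line[idx+1:]
-- are exactly take idx / drop (idx+1) on the code points.
def pvALoop : List String → PySem.Dict String Int → List String → Int →
    Option (PySem.Dict String Int × List String)
  | [], label, instrs, _ => some (label, instrs)
  | line :: rest, label, instrs, pc =>
    let cs := line.toList
    if PySem.Chars.isIn [':'] cs then
      let idx := (PySem.Chars.find cs [':']).toNat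
      let lbl := PySem.Chars.strip (cs.take idx)
      if lbl = [] then none
      else if !(PySem.Chars.isalpha (lbl.headD ' ')) then none
      else
        let label' := label.insert (String.ofList lbl) pc
        let body := PySem.Chars.strip (cs.drop (idx + 1))
        if body ≠ [] then pvALoop rest label' (instrs ++ [String.ofList body]) (pc + 4)
        else pvALoop rest label' instrs pc
    else
      if line ≠ "" then pvALoop rest label (instrs ++ [line]) (pc + 4)
      else pvALoop rest label instrs pc

def create_labels_and_instructions (cleaned_lines : List String) : (List (String × Int)) × List String :=
  match pvALoop cleaned_lines PySem.Dict.empty [] 0 with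
  | some (label, instrs) => (label.items, instrs)
  | none => ([], [])

-- ===== PORT B =====
-- Pass 1: parse each line into (label-name-or-none, body); `none` = the ValueError raises.
-- str.partition(":") with ':' present yields (take idx, ":", drop (idx+1)) at the first ':'.
def pvBParse : List String → Option (List (Option String × String))
  | [] => some []
  | line :: rest =>
    let cs := line.toList
    if PySem.Chars.isIn [':'] cs then
      let idx := (PySem.Chars.find cs [':']).toNat
      let name := PySem.Chars.strip (cs.take idx)
      if name = [] then none
      else if !(PySem.Chars.isalpha (name.headD ' ')) then none
      else (pvBParse rest).map
        (fun ps => (some (String.ofList name), String.ofList (PySem.Chars.strip (cs.drop (idx + 1)))) :: ps)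
    else (pvBParse rest).map (fun ps => (none, line) :: ps)

-- Pass 2: emit instructions; a label's address is 4 * len(all_instrs) at that point.
def pvBEmit : List (Option String × String) → PySem.Dict String Int → List String →
    PySem.Dict String Int × List String
  | [], label, instrs => (label, instrs)
  | (name?, body) :: rest, label, instrs =>
    let label' := match name? with
      | some n => label.insert n (4 * (instrs.length : Int))
      | none => label
    if body ≠ "" then pvBEmit rest label' (instrs ++ [body]) else pvBEmit rest label' instrs

def create_labels_and_instructions_alt (cleaned_lines : List String) : (List (String × Int)) × List String :=
  match pvBParse cleaned_lines with
  | some ps =>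
    match pvBEmit ps PySem.Dict.empty [] with
    | (label, instrs) => (label.items, instrs)
  | none => ([], [])

-- ===== PRECONDITION & SPEC =====
-- Pre_ excludes exactly the inputs where A raises ValueError: a line containing ':' whose
-- stripped label part is empty or does not start with a letter.
def Pre_create_labels_and_instructions (cleaned_lines : List String) : Prop :=
  ∀ line ∈ cleaned_lines,
    PySem.Chars.isIn [':'] line.toList = true →
      (PySem.Chars.strip (line.toList.take (PySem.Chars.find line.toList [':']).toNat) ≠ [] ∧
       PySem.Chars.isalpha
         ((PySem.Chars.strip (line.toList.take (PySem.Chars.find line.toList [':']).toNat)).headD ' ') = true)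
instance (cleaned_lines : List String) : Decidable (Pre_create_labels_and_instructions cleaned_lines) := by
  unfold Pre_create_labels_and_instructions; infer_instance

def pvWitness_create_labels_and_instructions : List String :=
  ["main: addi x1 x0 5", "loop:", "add x2 x2 x1", "", "end: beq x0 x0 0"]

def Spec_create_labels_and_instructions (cleaned_lines : List String) (out : (List (String × Int)) × List String) : Prop := out = create_labels_and_instructions_alt cleaned_lines
instance (cleaned_lines : List String) (out : (List (String × Int)) × List String) : Decidable (Spec_create_labels_and_instructions cleaned_lines out) := by unfold Spec_create_labels_and_instructions; infer_instance

-- ===== CLAIM (what is proved, stated in full; the proofs are below) =====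
def Claim_equal_create_labels_and_instructions : Prop := ∀ (cleaned_lines : List String), Dom_create_labels_and_instructions cleaned_lines → Pre_create_labels_and_instructions cleaned_lines → Spec_create_labels_and_instructions cleaned_lines (create_labels_and_instructions cleaned_lines)

-- ===== LEMMAS AND PROOFS =====

-- Invariant: on valid lines, A's loop (with pc = 4 * |instrs|) computes exactly parse-then-emit.
theorem pvLoop_eq (lines : List String) :
    ∀ (label : PySem.Dict String Int) (instrs : List String),
    Pre_create_labels_and_instructions lines →
    ∃ ps, pvBParse lines = some ps ∧
      pvALoop lines label instrs (4 * (instrs.length : Int)) = some (pvBEmit ps label instrs) := by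
  induction lines with
  | nil => intro label instrs _; exact ⟨[], rfl, rfl⟩
  | cons line rest ih =>
    intro label instrs hpre
    have hline := hpre line (List.mem_cons_self ..)
    have hrest : Pre_create_labels_and_instructions rest :=
      fun l hl => hpre l (List.mem_cons_of_mem _ hl)
    by_cases hin : PySem.Chars.isIn [':'] line.toList = true
    · obtain ⟨hne, halpha⟩ := hline hin
      replace halpha : PySem.Chars.isalpha
          ((PySem.Chars.strip
            (line.toList.take (PySem.Chars.find line.toList [':']).toNat)).head?.getD ' ') = true := by
        simpa using halpha
      by_cases hb : PySem.Chars.strip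
          (line.toList.drop ((PySem.Chars.find line.toList [':']).toNat + 1)) = []
      · obtain ⟨ps, hp, he⟩ :=
          ih (label.insert
                (String.ofList (PySem.Chars.strip
                  (line.toList.take (PySem.Chars.find line.toList [':']).toNat)))
                (4 * (instrs.length : Int))) instrs hrest
        refine ⟨(some (String.ofList (PySem.Chars.strip
            (line.toList.take (PySem.Chars.find line.toList [':']).toNat))),
          String.ofList (PySem.Chars.strip
            (line.toList.drop ((PySem.Chars.find line.toList [':']).toNat + 1)))) :: ps, ?_, ?_⟩
        · simp [pvBParse, hin, hne, halpha, hp]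
        · simp only [pvALoop, pvBEmit, hin, if_true]
          simpa [hne, halpha, hb] using he
      · obtain ⟨ps, hp, he⟩ :=
          ih (label.insert
                (String.ofList (PySem.Chars.strip
                  (line.toList.take (PySem.Chars.find line.toList [':']).toNat)))
                (4 * (instrs.length : Int)))
             (instrs ++ [String.ofList (PySem.Chars.strip
                (line.toList.drop ((PySem.Chars.find line.toList [':']).toNat + 1)))]) hrest
        have hlen : (4 : Int) * (((instrs ++ [String.ofList (PySem.Chars.strip
              (line.toList.drop ((PySem.Chars.find line.toList [':']).toNat + 1)))]).length : Nat) : Int)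
            = 4 * (instrs.length : Int) + 4 := by
          simp; ring
        rw [hlen] at he
        refine ⟨(some (String.ofList (PySem.Chars.strip
            (line.toList.take (PySem.Chars.find line.toList [':']).toNat))),
          String.ofList (PySem.Chars.strip
            (line.toList.drop ((PySem.Chars.find line.toList [':']).toNat + 1)))) :: ps, ?_, ?_⟩
        · simp [pvBParse, hin, hne, halpha, hp]
        · simp only [pvALoop, pvBEmit, hin, if_true]
          simpa [hne, halpha, hb] using he
    · by_cases hb : line = ""
      · obtain ⟨ps, hp, he⟩ := ih label instrs hrest
        refine ⟨(none, line) :: ps, ?_, ?_⟩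
        · simp [pvBParse, hin, hp]
        · simp only [pvALoop, pvBEmit, hin]
          simpa [hb] using he
      · obtain ⟨ps, hp, he⟩ := ih label (instrs ++ [line]) hrest
        have hlen : (4 : Int) * (((instrs ++ [line]).length : Nat) : Int)
            = 4 * (instrs.length : Int) + 4 := by
          simp; ring
        rw [hlen] at he
        refine ⟨(none, line) :: ps, ?_, ?_⟩
        · simp [pvBParse, hin, hp]
        · simp only [pvALoop, pvBEmit, hin]
          simpa [hb] using he

theorem create_labels_and_instructions_spec : Claim_equal_create_labels_and_instructions := by
  intro cleaned_lines _ hpre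
  unfold Spec_create_labels_and_instructions create_labels_and_instructions create_labels_and_instructions_alt
  obtain ⟨ps, hp, he⟩ := pvLoop_eq cleaned_lines PySem.Dict.empty [] hpre
  simp only [List.length_nil, Nat.cast_zero, mul_zero] at he
  simp [hp, he]
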